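-- pv_equiv track=rewrite | github.com/junh0328/prepare_algorithm | BOJ/BOJ_2920.py | solution
-- ===== SOURCE A (Python) =====
-- def solution(arr):
--     result = list()
--     answer = ''
--
--     for i in range(len(arr)):
--         if(arr[i] == 'c'):
--             result.append(1)
--         elif(arr[i] == 'd'):
--             result.append(2)
--         elif(arr[i] == 'e'):
--             result.append(3)
--         elif(arr[i] == 'f'):
--             result.append(4)
--         elif(arr[i] == 'g'):
--             result.append(5)
--         elif(arr[i] == 'a'):
--             result.append(6)
--         elif(arr[i] == 'b'):
--             result.append(7)
--         elif(arr[i] == 'C'):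
--             result.append(8)
--         else:
--             return None
--
--     if result == sorted(result):
--         answer = 'ascending'
--     elif result == sorted(result, reverse=True):
--         answer = 'descending'
--     else:
--         answer = 'mixed'
--
--     return answer
-- ===== SOURCE B (Python) =====
-- def solution(arr):
--     notes = {'c': 1, 'd': 2, 'e': 3, 'f': 4, 'g': 5, 'a': 6, 'b': 7, 'C': 8}
--     inc = True
--     dec = True
--     prev = None
--     for ch in arr:
--         if ch not in notes:
--             return None
--         v = notes[ch]
--         if prev is not None:
--             if v < prev:
--                 inc = False
--             if v > prev:
--                 dec = False
--         prev = v
--     if inc: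
--         return 'ascending'
--     if dec:
--         return 'descending'
--     return 'mixed'
-- ===== Notes on version B (the rewrite author's own statement) =====
-- stated objective: faster
-- what changed: Replaced the build-list-then-compare-with-two-sorted-copies classification by a single pass over the string that keeps non-decreasing/non-increasing flags and the previous note value, so no list is built and no sort is performed.
import Mathlib
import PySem

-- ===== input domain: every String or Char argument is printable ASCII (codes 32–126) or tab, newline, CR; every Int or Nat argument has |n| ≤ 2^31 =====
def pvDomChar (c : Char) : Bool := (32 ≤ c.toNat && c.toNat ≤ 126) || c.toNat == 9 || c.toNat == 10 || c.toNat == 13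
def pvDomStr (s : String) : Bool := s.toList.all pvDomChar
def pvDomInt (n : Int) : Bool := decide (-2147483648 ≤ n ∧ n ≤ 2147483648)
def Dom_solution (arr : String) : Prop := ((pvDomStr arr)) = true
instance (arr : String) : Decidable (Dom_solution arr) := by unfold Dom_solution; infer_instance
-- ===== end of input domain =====

-- B replaces "map to a list, compare with sorted and reverse-sorted copies" by one pass
-- tracking non-decreasing/non-increasing flags (asymptotically faster, no list, no sort).

-- ===== PORT A =====
-- A's per-character if/elif chain
def noteValA (c : Char) : Option Int :=
  if c = 'c' then some 1
  else if c = 'd' then some 2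
  else if c = 'e' then some 3
  else if c = 'f' then some 4
  else if c = 'g' then some 5
  else if c = 'a' then some 6
  else if c = 'b' then some 7
  else if c = 'C' then some 8
  else none

-- A's for-loop: append to result, early-return None on an unknown character
def buildA : List Char → List Int → Option (List Int)
  | [], acc => some acc
  | c :: cs, acc =>
    match noteValA c with
    | none => none
    | some v => buildA cs (acc ++ [v])

def solution (arr : String) : Option String :=
  match buildA arr.toList [] with
  | none => none
  | some result =>
    if result = PySem.List.sorted result (fun x => x) false then some "ascending"
    else if result = PySem.List.sorted result (fun x => x) true then some "descending"
    else some "mixed"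

-- ===== PORT B =====
-- B's dict of notes
def notesB : PySem.Dict Char Int :=
  PySem.Dict.ofList [('c', 1), ('d', 2), ('e', 3), ('f', 4), ('g', 5), ('a', 6), ('b', 7), ('C', 8)]

-- B's single pass: state = (inc flag, dec flag, previous value)
def loopB : List Char → Bool → Bool → Option Int → Option String
  | [], inc, dec, _ =>
    some (if inc then "ascending" else if dec then "descending" else "mixed")
  | c :: cs, inc, dec, prev =>
    match notesB.get? c with
    | none => none
    | some v =>
      match prev with
      | none => loopB cs inc dec (some v)
      | some p =>
        loopB cs (if v < p then false else inc) (if v > p then false else dec) (some v)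

def solution_alt (arr : String) : Option String :=
  loopB arr.toList true true none

-- ===== PRECONDITION & SPEC =====
def Spec_solution (arr : String) (out : Option String) : Prop := out = solution_alt arr
instance (arr : String) (out : Option String) : Decidable (Spec_solution arr out) := by unfold Spec_solution; infer_instance

-- ===== CLAIM (what is proved, stated in full; the proofs are below) =====
def Claim_equal_solution : Prop := ∀ (arr : String), Dom_solution arr → Spec_solution arr (solution arr)

-- ===== LEMMAS AND PROOFS =====

-- proof-only helpers
def mapNotes : List Char → Option (List Int)
  | [] => some []
  | c :: cs =>
    match noteValA c with
    | none => none
    | some v => (mapNotes cs).map (v :: ·)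

def monoB (r : Int → Int → Prop) [DecidableRel r] : Int → List Int → Bool
  | _, [] => true
  | p, v :: l => decide (r p v) && monoB r v l

theorem notesB_eq_mk : notesB = PySem.Dict.mk
    [('c', 1), ('d', 2), ('e', 3), ('f', 4), ('g', 5), ('a', 6), ('b', 7), ('C', 8)] := by
  decide

theorem notesB_get?_eq (c : Char) : notesB.get? c = noteValA c := by
  by_cases h1 : c = 'c'; · subst h1; decide
  by_cases h2 : c = 'd'; · subst h2; decide
  by_cases h3 : c = 'e'; · subst h3; decide
  by_cases h4 : c = 'f'; · subst h4; decide
  by_cases h5 : c = 'g'; · subst h5; decide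
  by_cases h6 : c = 'a'; · subst h6; decide
  by_cases h7 : c = 'b'; · subst h7; decide
  by_cases h8 : c = 'C'; · subst h8; decide
  simp [notesB_eq_mk, PySem.Dict.get?, noteValA,
    h1, h2, h3, h4, h5, h6, h7, h8,
    Ne.symm h1, Ne.symm h2, Ne.symm h3, Ne.symm h4,
    Ne.symm h5, Ne.symm h6, Ne.symm h7, Ne.symm h8]

theorem buildA_eq (cs : List Char) : ∀ acc : List Int,
    buildA cs acc = (mapNotes cs).map (fun l => acc ++ l) := by
  induction cs with
  | nil => intro acc; simp [buildA, mapNotes]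
  | cons c cs ih =>
    intro acc
    simp only [buildA, mapNotes]
    cases h : noteValA c with
    | none => rfl
    | some v =>
      simp only
      rw [ih]
      cases mapNotes cs <;> simp

theorem monoB_iff (r : Int → Int → Prop) [DecidableRel r]
    (htr : ∀ a b c, r a b → r b c → r a c) :
    ∀ (l : List Int) (p : Int), monoB r p l = true ↔ (p :: l).Pairwise r := by
  intro l
  induction l with
  | nil => intro p; simp [monoB]
  | cons v l ih =>
    intro p
    simp only [monoB, Bool.and_eq_true, decide_eq_true_eq, ih v]
    constructor
    · rintro ⟨hpv, hvl⟩
      refine List.pairwise_cons.mpr ⟨?_, hvl⟩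
      intro x hx
      rcases List.mem_cons.mp hx with rfl | hx
      · exact hpv
      · exact htr p v x hpv (List.rel_of_pairwise_cons hvl hx)
    · intro h
      rcases List.pairwise_cons.mp h with ⟨hall, hvl⟩
      exact ⟨hall v (List.mem_cons_self ..), hvl⟩

-- characterisation of "result == sorted(result)"
theorem eq_sorted_iff (l : List Int) :
    l = PySem.List.sorted l (fun x => x) false ↔ l.Pairwise (· ≤ ·) := by
  constructor
  · intro h
    have := PySem.List.sorted_pairwise (xs := l) (key := fun x => x)
    rw [← h] at this
    exact this
  · intro h
    exact (PySem.List.sorted_eq_self_of_pairwise (xs := l) (key := fun x => x) h).symm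

theorem eq_sorted_rev_iff (l : List Int) :
    l = PySem.List.sorted l (fun x => x) true ↔ l.Pairwise (fun a b => b ≤ a) := by
  constructor
  · intro h
    have := PySem.List.sorted_pairwise_rev (xs := l) (key := fun x => x)
    rw [← h] at this
    exact this
  · intro h
    exact (PySem.List.sorted_rev_eq_self_of_pairwise (xs := l) (key := fun x => x) h).symm

-- invariant of B's single pass, relative to the mapped note list
theorem loopB_eq (cs : List Char) : ∀ (inc dec : Bool) (p : Int),
    loopB cs inc dec (some p) =
      (mapNotes cs).map (fun l =>
        if inc && monoB (· ≤ ·) p l then "ascending"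
        else if dec && monoB (fun a b => b ≤ a) p l then "descending"
        else "mixed") := by
  induction cs with
  | nil =>
    intro inc dec p
    cases inc <;> cases dec <;> simp [loopB, mapNotes, monoB]
  | cons c cs ih =>
    intro inc dec p
    simp only [loopB, mapNotes, notesB_get?_eq]
    cases h : noteValA c with
    | none => rfl
    | some v =>
      simp only
      rw [ih]
      cases hm : mapNotes cs with
      | none => rfl
      | some l =>
        simp only [Option.map_some]
        congr 1
        have e1 : (if v < p then false else inc) = (inc && decide (p ≤ v)) := by
          by_cases hh : v < p
          · simp [hh, show ¬ p ≤ v by omega]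
          · simp [hh, show p ≤ v by omega]
        have e2 : (if v > p then false else dec) = (dec && decide (v ≤ p)) := by
          by_cases hh : v > p
          · simp [hh, show ¬ v ≤ p by omega]
          · simp [hh, show v ≤ p by omega]
        rw [e1, e2]
        simp [monoB, Bool.and_assoc]

theorem solution_eq_alt (arr : String) : solution arr = solution_alt arr := by
  unfold solution solution_alt
  rw [buildA_eq]
  cases arr.toList with
  | nil => simp [mapNotes, loopB, PySem.List.sorted_eq_nil_iff]
  | cons c cs' =>
    simp only [loopB, mapNotes, notesB_get?_eq]
    cases h : noteValA c with
    | none => rfl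
    | some v =>
      simp only
      rw [loopB_eq]
      cases hm : mapNotes cs' with
      | none => rfl
      | some l =>
        simp only [Option.map_some, List.nil_append, Bool.true_and]
        have h1 : ((v :: l) = PySem.List.sorted (v :: l) (fun x => x) false) ↔
            monoB (· ≤ ·) v l = true :=
          (eq_sorted_iff (v :: l)).trans
            (monoB_iff (· ≤ ·) (fun a b c hab hbc => le_trans hab hbc) l v).symm
        have h2 : ((v :: l) = PySem.List.sorted (v :: l) (fun x => x) true) ↔
            monoB (fun a b => b ≤ a) v l = true :=
          (eq_sorted_rev_iff (v :: l)).trans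
            (monoB_iff (fun a b => b ≤ a) (fun a b c hab hbc => le_trans hbc hab) l v).symm
        by_cases ha : monoB (· ≤ ·) v l = true
        · rw [if_pos (h1.mpr ha)]
          simp [ha]
        · rw [if_neg (fun h => ha (h1.mp h))]
          by_cases hd : monoB (fun a b => b ≤ a) v l = true
          · rw [if_pos (h2.mpr hd)]
            simp [ha, hd]
          · rw [if_neg (fun h => hd (h2.mp h))]
            simp [ha, hd]

-- ===== VERDICT (by name: the statement is the Claim_ definition above) =====
theorem solution_spec : Claim_equal_solution := by
  intro arr _
  unfold Spec_solution
  exact solution_eq_alt arr
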